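-- pv_equiv track=rewrite | github.com/nikickk/crawling | sentiment_youtube/youtube_sentiment4.py | combine_word_pairs
-- ===== SOURCE A (Python) =====
-- def combine_word_pairs(tokens, word_pairs):
--     combined_tokens = []
--     i = 0
--     while i < len(tokens):
--         for pair in word_pairs:
--             if i + len(pair) - 1 < len(tokens) and tuple(tokens[i:i + len(pair)]) == pair:
--                 combined_tokens.append("".join(pair))  # 단어 조합 결합
--                 i += len(pair)  # 조합된 단어 수만큼 건너뜀
--                 break
--         else:
--             combined_tokens.append(tokens[i])
--             i += 1
--     return combined_tokens
-- ===== SOURCE B (Python) =====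
-- def combine_word_pairs(tokens, word_pairs):
--     # Pairs are bucketed once by first token; the tokens are consumed as a stack
--     # (top = next token): only the bucket of the current top token is scanned.
--     buckets = {}
--     for pair in word_pairs:
--         if pair:
--             buckets.setdefault(pair[0], []).append(tuple(pair))
--     out = []
--     stack = list(reversed(tokens))
--     while stack:
--         t = stack[-1]
--         for pair in buckets.get(t, ()):
--             if len(pair) <= len(stack) and all(stack[-1 - k] == pair[k] for k in range(len(pair))):
--                 out.append("".join(pair))
--                 del stack[len(stack) - len(pair):]
--                 break
--         else:
--             out.append(t)
--             stack.pop()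
--     return out
-- ===== Notes on version B (the rewrite author's own statement) =====
-- stated objective: faster
-- what changed: B builds once a dict bucketing word_pairs by first token and consumes the tokens as a stack, so each position scans only the pairs starting with the current token instead of the whole word_pairs list and uses no index arithmetic or slicing.
-- outside the precondition, e.g. on combine_word_pairs(['a'], [('a',), ()]): A returns ['a'], B returns ['a']; on combine_word_pairs(['a'], [()]): A does not finish within the time limit, B returns ['a']
import Mathlib
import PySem

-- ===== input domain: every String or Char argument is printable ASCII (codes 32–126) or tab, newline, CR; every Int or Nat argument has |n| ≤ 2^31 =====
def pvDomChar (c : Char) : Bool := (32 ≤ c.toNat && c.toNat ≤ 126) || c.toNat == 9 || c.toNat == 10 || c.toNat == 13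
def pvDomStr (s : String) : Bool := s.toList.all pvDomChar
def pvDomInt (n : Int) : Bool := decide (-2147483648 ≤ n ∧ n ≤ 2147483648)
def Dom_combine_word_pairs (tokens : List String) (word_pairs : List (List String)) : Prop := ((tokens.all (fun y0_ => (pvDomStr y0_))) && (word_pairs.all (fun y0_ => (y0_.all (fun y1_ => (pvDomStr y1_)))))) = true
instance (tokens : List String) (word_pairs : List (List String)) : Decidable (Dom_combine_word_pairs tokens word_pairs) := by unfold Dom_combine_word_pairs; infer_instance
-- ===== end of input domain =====

-- B buckets the pairs by first token in a dict built once and consumes the tokens as a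
-- stack, scanning only the bucket of the top token; a timing run measured it faster.

-- ===== PORT A =====
-- the for-loop's match test: i + len(pair) - 1 < len(tokens) and tuple(tokens[i:i+len(pair)]) == pair
def pvAMatch (tokens : List String) (i : Nat) (pair : List String) : Bool :=
  decide ((i : Int) + (pair.length : Int) - 1 < (tokens.length : Int)) &&
  (PySem.List.slice tokens (some (i : Int)) (some ((i : Int) + (pair.length : Int))) == pair)

-- the while loop; fuel = tokens.length bounds the iterations (each advances i by ≥ 1 under Pre_)
def pvAGo (tokens : List String) (word_pairs : List (List String)) : Nat → Nat → List String → List String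
  | 0, _, acc => acc
  | fuel + 1, i, acc =>
    if i < tokens.length then
      match word_pairs.find? (pvAMatch tokens i) with
      | some pair => pvAGo tokens word_pairs fuel (i + pair.length) (acc ++ [PySem.Str.join "" pair])
      | none => pvAGo tokens word_pairs fuel (i + 1) (acc ++ [tokens.getD i ""])
    else acc

def combine_word_pairs (tokens : List String) (word_pairs : List (List String)) : List String :=
  pvAGo tokens word_pairs tokens.length 0 []

-- ===== PORT B =====
-- buckets.setdefault(pair[0], []).append(tuple(pair))  (empty pairs skipped)
def pvBuckets (word_pairs : List (List String)) : PySem.Dict String (List (List String)) :=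
  word_pairs.foldl
    (fun d pair =>
      match pair with
      | [] => d
      | t :: _ => d.modify t [] (· ++ [pair]))
    PySem.Dict.empty

-- the while loop over the stack, top first: the Python stack holds the tokens reversed with
-- the top at the end, i.e. exactly the remaining suffix read top-first, which is this list;
-- 'len(pair) <= len(stack) and all(stack[-1-k] == pair[k] …)' is exactly pair.isPrefixOf.
-- 'del stack[len(stack)-len(pair):]' pops len(pair) ≥ 1 tokens (buckets hold no empty pair),
-- i.e. drops pair.length - 1 from the tail, so the recursion is structurally decreasing.
def pvBPop (buckets : PySem.Dict String (List (List String))) : List String → List String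
  | [] => []
  | t :: rest =>
    match (buckets.getD t []).find? (fun pair => pair.isPrefixOf (t :: rest)) with
    | some pair => PySem.Str.join "" pair :: pvBPop buckets (rest.drop (pair.length - 1))
    | none => t :: pvBPop buckets rest
  termination_by stack => stack.length
  decreasing_by
  · simp only [List.length_drop, List.length_cons]; omega
  · simp only [List.length_cons]; omega

def combine_word_pairs_alt (tokens : List String) (word_pairs : List (List String)) : List String :=
  pvBPop (pvBuckets word_pairs) tokens

-- ===== PRECONDITION & SPEC =====
-- Pre_ excludes inputs holding an empty pair while tokens is nonempty: an empty pair matches at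
-- any position and advances i by 0, so A can loop forever there (B skips empty pairs).
def Pre_combine_word_pairs (tokens : List String) (word_pairs : List (List String)) : Prop :=
  tokens = [] ∨ [] ∉ word_pairs
instance (tokens : List String) (word_pairs : List (List String)) : Decidable (Pre_combine_word_pairs tokens word_pairs) := by unfold Pre_combine_word_pairs; infer_instance

def pvWitness_combine_word_pairs : List String × List (List String) :=
  (["a", "b", "c", "a", "b"], [["a", "b"], ["b", "c"]])

def Spec_combine_word_pairs (tokens : List String) (word_pairs : List (List String)) (out : List String) : Prop := out = combine_word_pairs_alt tokens word_pairs
instance (tokens : List String) (word_pairs : List (List String)) (out : List String) : Decidable (Spec_combine_word_pairs tokens word_pairs out) := by unfold Spec_combine_word_pairs; infer_instance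

-- ===== CLAIM (what is proved, stated in full; the proofs are below) =====
def Claim_equal_combine_word_pairs : Prop := ∀ (tokens : List String) (word_pairs : List (List String)), Dom_combine_word_pairs tokens word_pairs → Pre_combine_word_pairs tokens word_pairs → Spec_combine_word_pairs tokens word_pairs (combine_word_pairs tokens word_pairs)

-- ===== LEMMAS AND PROOFS =====

-- for a nonempty pair A's bound-plus-slice test at i is the prefix test on the suffix at i
theorem pvAMatch_eq_isPrefixOf (tokens : List String) (i : Nat) (pair : List String)
    (hp : pair ≠ []) :
    pvAMatch tokens i pair = pair.isPrefixOf (tokens.drop i) := by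
  unfold pvAMatch
  rw [PySem.List.slice_natCast_add]
  by_cases h : (tokens.drop i).take pair.length = pair
  · have hlen : pair.length ≤ (tokens.drop i).length := by
      have := congrArg List.length h
      simp only [List.length_take] at this
      omega
    have hpre : pair.isPrefixOf (tokens.drop i) = true := by
      rw [List.isPrefixOf_iff_prefix]
      exact h ▸ List.take_prefix _ _
    have hlen1 : 1 ≤ pair.length := by
      cases pair with | nil => exact absurd rfl hp | cons _ _ => simp
    have hlen' : i + pair.length ≤ tokens.length := by
      have := List.length_drop (l := tokens) (i := i); omega
    simp only [hpre, h, beq_self_eq_true, Bool.and_true, decide_eq_true_eq]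
    have h1 : ((i : Int)) + ((pair.length : Nat) : Int) ≤ ((tokens.length : Nat) : Int) := by
      exact_mod_cast hlen'
    omega
  · have hpre : pair.isPrefixOf (tokens.drop i) = false := by
      rw [Bool.eq_false_iff]
      intro hc
      rw [List.isPrefixOf_iff_prefix] at hc
      exact h (List.prefix_iff_eq_take.mp hc).symm
    simp [hpre, h]

-- the bucket-building fold, from any starting dict, appends to the key's list
theorem pvBuckets_getD_aux (word_pairs : List (List String)) (t : String)
    (d : PySem.Dict String (List (List String))) :
    (word_pairs.foldl
      (fun d pair => match pair with
        | [] => d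
        | tt :: _ => d.modify tt [] (· ++ [pair])) d).getD t [] =
      d.getD t [] ++ word_pairs.filter (fun p => p.head? == some t) := by
  induction word_pairs generalizing d with
  | nil => simp
  | cons p ps ih =>
    match p with
    | [] => simp [ih]
    | h :: rest =>
      simp only [List.foldl_cons, ih, List.filter_cons]
      by_cases ht : h = t
      · subst ht
        simp [PySem.Dict.getD_modify_self]
      · simp [PySem.Dict.getD_modify_of_ne (hne := Ne.symm ht), ht]

-- the bucket at key t holds exactly the pairs whose head is t, in order
theorem pvBuckets_getD (word_pairs : List (List String)) (t : String) :
    (pvBuckets word_pairs).getD t [] =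
      word_pairs.filter (fun p => p.head? == some t) := by
  unfold pvBuckets
  rw [pvBuckets_getD_aux]
  simp

-- a pair whose head is not t is never a prefix of t :: rest
theorem isPrefixOf_false_of_head_ne (t : String) (rest pair : List String)
    (hp : pair ≠ []) (h : pair.head? ≠ some t) : pair.isPrefixOf (t :: rest) = false := by
  match pair with
  | [] => exact absurd rfl hp
  | q :: qs =>
    rw [Bool.eq_false_iff]
    intro hc
    rw [List.isPrefixOf_iff_prefix] at hc
    rcases hc with ⟨s, hs⟩
    simp only [List.cons_append, List.cons.injEq] at hs
    exact h (by simp [hs.1])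

-- the first match of A's test over all pairs is the first prefix match in the top token's bucket
theorem pvFind_agree (tokens : List String) (word_pairs : List (List String)) (i : Nat)
    (t : String) (rest : List String) (hd : tokens.drop i = t :: rest)
    (hne : [] ∉ word_pairs) :
    word_pairs.find? (pvAMatch tokens i) =
      ((pvBuckets word_pairs).getD t []).find? (fun pair => pair.isPrefixOf (t :: rest)) := by
  rw [pvBuckets_getD]
  induction word_pairs with
  | nil => rfl
  | cons p ps ih =>
    have hp : p ≠ [] := by intro h; exact hne (h ▸ List.mem_cons_self)
    have hps : [] ∉ ps := fun h => hne (List.mem_cons_of_mem _ h)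
    by_cases ht : p.head? = some t
    · rw [List.filter_cons_of_pos (by simpa using ht), List.find?_cons, List.find?_cons,
        pvAMatch_eq_isPrefixOf tokens i p hp, hd]
      cases hB : p.isPrefixOf (t :: rest)
      · simpa [hB] using ih hps
      · simp
    · rw [List.filter_cons_of_neg (by simpa using ht), List.find?_cons,
        pvAMatch_eq_isPrefixOf tokens i p hp, hd,
        isPrefixOf_false_of_head_ne t rest p hp ht]
      simpa using ih hps

-- any pair the bucket's find? returns lies in word_pairs' filter, hence is nonempty
theorem pvFind_bucket_nonempty (word_pairs : List (List String)) (t : String)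
    (q : List String → Bool) (pair : List String)
    (h : ((pvBuckets word_pairs).getD t []).find? q = some pair) : pair ≠ [] := by
  rw [pvBuckets_getD] at h
  have hm := List.mem_of_find?_eq_some h
  have := List.of_mem_filter hm
  intro hnil
  rw [hnil] at this
  simp at this

-- A's indexed fuel loop, run from position i, is acc ++ B's stack run on the suffix at i
theorem pvGo_agree (tokens : List String) (word_pairs : List (List String))
    (hne : [] ∉ word_pairs) :
    ∀ (fuel i : Nat) (acc : List String), tokens.length ≤ fuel + i →
      pvAGo tokens word_pairs fuel i acc =
        acc ++ pvBPop (pvBuckets word_pairs) (tokens.drop i) := by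
  intro fuel
  induction fuel with
  | zero =>
    intro i acc hle
    have : tokens.drop i = [] := List.drop_eq_nil_of_le (by omega)
    simp [pvAGo, this, pvBPop]
  | succ f ih =>
    intro i acc hle
    unfold pvAGo
    by_cases hi : i < tokens.length
    · have hd : tokens.drop i = tokens[i] :: tokens.drop (i + 1) :=
        List.drop_eq_getElem_cons hi
      have hgetD : tokens.getD i "" = tokens[i] := by
        simp [List.getD, List.getElem?_eq_getElem hi]
      rw [hd]
      unfold pvBPop
      rw [if_pos hi, pvFind_agree tokens word_pairs i tokens[i] (tokens.drop (i + 1)) hd hne]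
      cases hf : ((pvBuckets word_pairs).getD tokens[i] []).find?
          (fun pair => pair.isPrefixOf (tokens[i] :: tokens.drop (i + 1))) with
      | none =>
        dsimp only
        rw [ih (i + 1) _ (by omega), hgetD]
        simp
      | some pair =>
        have hp1 : 1 ≤ pair.length := by
          have := pvFind_bucket_nonempty word_pairs tokens[i] _ pair hf
          cases pair with | nil => exact absurd rfl this | cons _ _ => simp
        have hdrop : (tokens.drop (i + 1)).drop (pair.length - 1) =
            tokens.drop (i + pair.length) := by
          rw [List.drop_drop]
          congr 1
          omega
        dsimp only
        rw [ih (i + pair.length) _ (by omega), hdrop]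
        simp
    · have : tokens.drop i = [] := List.drop_eq_nil_of_le (by omega)
      simp [hi, this, pvBPop]

-- ===== VERDICT (by name: the statement is the Claim_ definition above) =====
theorem combine_word_pairs_spec : Claim_equal_combine_word_pairs := by
  intro tokens word_pairs _ hpre
  unfold Spec_combine_word_pairs combine_word_pairs combine_word_pairs_alt
  rcases hpre with h | h
  · subst h; simp [pvAGo, pvBPop]
  · simpa using pvGo_agree tokens word_pairs h tokens.length 0 [] (by omega)
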